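-- pv_equiv track=rewrite | github.com/Walkiiiy/CODR | src/proportion/doremiExample/eval_datasets.py | substring_until
-- ===== SOURCE A (Python) =====
-- from typing import List, Dict, Any, Optional, Callable, Union
--
-- def substring_until(s: str, split_strs: List[str]) -> str:
--     """
--     提取直到遇到任一分隔字符串之前的子串。
--
--     参数：
--         s: 输入字符串。
--         split_strs: 待查找的分隔字符串列表（返回首次匹配前的子串）。
--
--     返回：
--         str: s 中第一次出现任一分隔字符串之前的子串。
--     """
--     idx: int = len(s)
--     for split_str in split_strs:
--         try:
--             new_idx = s.index(split_str)
--             if new_idx < idx: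
--                 idx = new_idx
--         except Exception:
--             pass
--     return s[:idx]
-- ===== SOURCE B (Python) =====
-- def substring_until(s, split_strs):
--     for i in range(len(s)):
--         if any(s.startswith(p, i) for p in split_strs):
--             return s[:i]
--     return s
-- ===== Notes on version B (the rewrite author's own statement) =====
-- stated objective: faster
-- what changed: A takes the minimum over the separator list of s.index first-occurrence positions, scanning the whole string once per separator; B does a single left-to-right scan over positions of s and returns at the first position where any separator starts, so it never looks past the earliest match.
import Mathlib
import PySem

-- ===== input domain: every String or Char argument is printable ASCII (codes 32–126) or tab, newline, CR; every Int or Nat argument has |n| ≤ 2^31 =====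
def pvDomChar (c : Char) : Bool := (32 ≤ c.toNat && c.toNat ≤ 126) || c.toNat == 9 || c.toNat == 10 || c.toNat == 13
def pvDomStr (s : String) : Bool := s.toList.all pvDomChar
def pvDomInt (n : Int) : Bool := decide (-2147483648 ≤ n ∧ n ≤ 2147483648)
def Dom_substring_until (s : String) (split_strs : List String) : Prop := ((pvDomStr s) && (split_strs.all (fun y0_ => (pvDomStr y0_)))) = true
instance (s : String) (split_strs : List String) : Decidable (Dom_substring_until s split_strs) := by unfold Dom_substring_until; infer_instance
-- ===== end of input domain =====

-- B replaces A's per-pattern s.index scans (running minimum of first occurrences) by a single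
-- left-to-right scan over positions that returns at the first position where any separator
-- starts, stopping at the earliest match (objective: faster, measured).

-- ===== PORT A =====
-- A: idx = len(s); for p in split_strs: try: new_idx = s.index(p); if new_idx < idx: idx = new_idx
--    except: pass; return s[:idx]      (s.index(p) raising ValueError = Chars.find … = -1)
def substring_until (s : String) (split_strs : List String) : String :=
  let idx : Int :=
    split_strs.foldl
      (fun idx p =>
        let new_idx := PySem.Chars.find s.toList p.toList
        if new_idx = -1 then idx
        else if new_idx < idx then new_idx else idx)
      (s.toList.length : Int)
  String.mk (PySem.List.slice s.toList none (some idx))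

-- ===== PORT B =====
-- B: for i in range(len(s)): if any(s.startswith(p, i) for p in split_strs): return s[:i]
--    return s
def altGo (full : List Char) (ps : List String) (i : Nat) : Nat :=
  if i < full.length then
    if ps.any (fun p => PySem.Chars.startswith (full.drop i) p.toList) then i
    else altGo full ps (i + 1)
  else full.length
termination_by full.length - i

def substring_until_alt (s : String) (split_strs : List String) : String :=
  String.mk ((s.toList).take (altGo s.toList split_strs 0))

-- ===== PRECONDITION & SPEC =====
def Spec_substring_until (s : String) (split_strs : List String) (out : String) : Prop := out = substring_until_alt s split_strs
instance (s : String) (split_strs : List String) (out : String) : Decidable (Spec_substring_until s split_strs out) := by unfold Spec_substring_until; infer_instance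

-- ===== CLAIM (what is proved, stated in full; the proofs are below) =====
def Claim_equal_substring_until : Prop := ∀ (s : String) (split_strs : List String), Dom_substring_until s split_strs → Spec_substring_until s split_strs (substring_until s split_strs)

-- ===== LEMMAS AND PROOFS =====

-- "some separator starts at position k of the full string"
def MatchAt (full : List Char) (ps : List String) (k : Nat) : Prop :=
  ∃ p ∈ ps, p.toList <+: full.drop k

lemma matchAt_iff_any (full : List Char) (ps : List String) (k : Nat) :
    MatchAt full ps k ↔ ps.any (fun p => PySem.Chars.startswith (full.drop k) p.toList) = true := by
  simp [MatchAt, List.any_eq_true, PySem.Chars.startswith_iff]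

-- a separator has an occurrence somewhere iff its find is not -1
lemma find_ne_neg_one_of_prefix_drop (full : List Char) (p : List Char) (k : Nat)
    (h : p <+: full.drop k) : PySem.Chars.find full p ≠ -1 := by
  rw [PySem.Chars.find_ne_neg_one_iff, ← PySem.Chars.isIn_iff_infix,
    ← PySem.Chars.exists_prefix_drop_iff_isIn]
  exact ⟨k, h⟩

-- B's scan: bounds, no match strictly before the result, a match at the result if it is < length
lemma altGo_spec (full : List Char) (ps : List String) :
    ∀ (i : Nat), i ≤ full.length →
      (i ≤ altGo full ps i ∧ altGo full ps i ≤ full.length) ∧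
      (∀ k, i ≤ k → k < altGo full ps i → ¬ MatchAt full ps k) ∧
      (altGo full ps i < full.length → MatchAt full ps (altGo full ps i)) := by
  intro i
  induction i using altGo.induct (full := full) (ps := ps) with
  | case1 i hlt hmatch =>
    intro hi
    rw [altGo, if_pos hlt, if_pos hmatch]
    refine ⟨⟨le_rfl, by omega⟩, ?_, fun _ => (matchAt_iff_any ..).2 hmatch⟩
    intro k hk hk'; omega
  | case2 i hlt hmatch ih =>
    intro hi
    have ih := ih (by omega)
    rw [altGo, if_pos hlt, if_neg hmatch]
    refine ⟨⟨by omega, ih.1.2⟩, ?_, ih.2.2⟩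
    intro k hk hk'
    rcases Nat.eq_or_lt_of_le hk with rfl | hk2
    · rw [matchAt_iff_any]; exact fun hc => hmatch hc
    · exact ih.2.1 k hk2 hk'
  | case3 i hge =>
    intro hi
    rw [altGo, if_neg hge]
    exact ⟨⟨by omega, le_rfl⟩, fun k hk hk' => by omega, fun h => absurd h (lt_irrefl _)⟩

-- A's fold step, named (definitionally equal to the lambda in the port)
def aStep (s : List Char) (idx : Int) (p : String) : Int :=
  if PySem.Chars.find s p.toList = -1 then idx
  else if PySem.Chars.find s p.toList < idx then PySem.Chars.find s p.toList else idx

lemma foldl_eq_aStep (s : List Char) (ps : List String) (a : Int) :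
    ps.foldl
      (fun idx p =>
        let new_idx := PySem.Chars.find s p.toList
        if new_idx = -1 then idx
        else if new_idx < idx then new_idx else idx) a = ps.foldl (aStep s) a := rfl

-- A's fold: characterisation of the running minimum of the found indices
lemma foldA_spec (s : List Char) (ps : List String) :
    ∀ (a : Int),
      ps.foldl (aStep s) a ≤ a ∧
      (ps.foldl (aStep s) a = a ∨
        ∃ p ∈ ps, ps.foldl (aStep s) a = PySem.Chars.find s p.toList ∧ 0 ≤ ps.foldl (aStep s) a) ∧
      (∀ p ∈ ps, PySem.Chars.find s p.toList ≠ -1 →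
        ps.foldl (aStep s) a ≤ PySem.Chars.find s p.toList) := by
  induction ps with
  | nil => intro a; simp
  | cons hd tl ih =>
    intro a
    simp only [List.foldl_cons]
    set j := PySem.Chars.find s hd.toList with hj
    set a' : Int := aStep s a hd with ha'
    have ha'cases : a' = if j = -1 then a else if j < a then j else a := rfl
    obtain ⟨h1, h2, h3⟩ := ih a'
    have ha'a : a' ≤ a := by
      rw [ha'cases]; split_ifs <;> omega
    refine ⟨le_trans h1 ha'a, ?_, ?_⟩
    · rcases h2 with h2 | ⟨p, hp, hpe, hpnn⟩
      · by_cases hj1 : j = -1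
        · left
          exact h2.trans (by rw [ha'cases, if_pos hj1])
        · have hj0 : 0 ≤ j := by
            have := PySem.Chars.neg_one_le_find s hd.toList
            rw [← hj] at this; omega
          by_cases hja : j < a
          · have ha2 : a' = j := by rw [ha'cases, if_neg hj1, if_pos hja]
            exact Or.inr ⟨hd, List.mem_cons_self ..,
              h2.trans (ha2.trans hj), by rw [h2, ha2]; exact hj0⟩
          · left
            exact h2.trans (by rw [ha'cases, if_neg hj1, if_neg hja])
      · exact Or.inr ⟨p, List.mem_cons_of_mem _ hp, hpe, hpnn⟩
    · intro p hp hpne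
      rcases List.mem_cons.1 hp with rfl | hptl
      · rw [← hj] at hpne ⊢
        have : a' ≤ j := by
          rw [ha'cases, if_neg hpne]; split_ifs <;> omega
        exact le_trans h1 this
      · exact h3 p hptl hpne

-- the two results coincide
lemma main_eq (s : List Char) (ps : List String) :
    (ps.foldl
      (fun idx p =>
        let new_idx := PySem.Chars.find s p.toList
        if new_idx = -1 then idx
        else if new_idx < idx then new_idx else idx) (s.length : Int)) =
    ((altGo s ps 0 : Nat) : Int) := by
  rw [foldl_eq_aStep]
  obtain ⟨hF1, hF2, hF3⟩ := foldA_spec s ps (s.length : Int)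
  set F := ps.foldl (aStep s) (s.length : Int) with hFdef
  obtain ⟨⟨hr0, hrlen⟩, hrno, hrmatch⟩ := altGo_spec s ps 0 (Nat.zero_le _)
  set r := altGo s ps 0 with hrdef
  have hF0 : 0 ≤ F := by
    rcases hF2 with h | ⟨_, _, _, h⟩
    · rw [h]; positivity
    · exact h
  rcases lt_trichotomy F ((r : Nat) : Int) with hlt | heq | hgt
  · -- F < r : F points at a match strictly before r — contradicts hrno
    exfalso
    have hFlen : F < (s.length : Int) := by
      have : ((r : Nat) : Int) ≤ (s.length : Int) := by exact_mod_cast hrlen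
      omega
    rcases hF2 with h | ⟨p, hp, hpe, _⟩
    · omega
    · have hfind0 : 0 ≤ PySem.Chars.find s p.toList := by omega
      have hpref := (PySem.Chars.find_spec hfind0).1
      have hmatch : MatchAt s ps F.toNat := ⟨p, hp, by rwa [← hpe] at hpref⟩
      exact hrno F.toNat (Nat.zero_le _) (by omega) hmatch
  · exact heq
  · -- r < F : some separator matches at r, so its find is ≤ r < F ≤ find — contradiction
    exfalso
    have hrltlen : r < s.length := by
      have : F ≤ (s.length : Int) := hF1
      omega
    obtain ⟨p, hp, hpref⟩ := hrmatch hrltlen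
    have hne := find_ne_neg_one_of_prefix_drop s p.toList r hpref
    have hmin := hF3 p hp hne
    have hfind0 : 0 ≤ PySem.Chars.find s p.toList := by
      have := PySem.Chars.neg_one_le_find s p.toList
      omega
    have hle : (PySem.Chars.find s p.toList).toNat ≤ r := by
      by_contra hcon
      exact (PySem.Chars.find_spec hfind0).2 r (by omega) hpref
    omega

-- ===== VERDICT (by name: the statement is the Claim_ definition above) =====
theorem substring_until_spec : Claim_equal_substring_until := by
  intro s ps _
  unfold Spec_substring_until substring_until substring_until_alt
  rw [main_eq s.toList ps]
  show String.mk (PySem.List.slice s.toList none (some ((altGo s.toList ps 0 : Nat) : Int))) = _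
  rw [PySem.List.slice_to_natCast]
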